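-- pv_equiv track=rewrite | github.com/pedro-com/gameofset | app/set_components/mod_vector.py | generate_mod_affine_space
-- ===== SOURCE A (Python) =====
-- from typing import Tuple, Iterable, List
--
-- def mod_addition(x: Tuple[int], y: Tuple[int], m: int):
--     """Modular addition of two vector tuples, such that the resulting vector has the same length as the smallest"""
--     return tuple((xi + yi) % m for xi, yi in zip(x, y))
--
-- def mod_product(x: Tuple[int], k: int, m: int):
--     """Modular scalar product between a value k and a vector x"""
--     return tuple((k * xi) % m for xi in x)
--
-- def generate_mod_affine_space(p0, base: Iterable, m: int):
--     """Generate all the points in an affine finite space of order m, centered at p0 and the group of vectors, base"""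
--     affine_space = [tuple(p0)]
--     new_points = []
--     # Add new points every iteration, by adding the vector v_k from the vector base
--     for ei in base:
--         for vk in (mod_product(ei, k, m) for k in range(1, m)):
--             new_points.extend((mod_addition(p, vk, m) for p in affine_space))
--         affine_space.extend(new_points)
--         new_points = []
--     return affine_space
-- ===== SOURCE B (Python) =====
-- def mod_addition(x, y, m):
--     """Modular addition of two vector tuples (length = the smaller)."""
--     return tuple((xi + yi) % m for xi, yi in zip(x, y))
--
--
-- def mod_product(x, k, m):
--     """Modular scalar product of k and vector x."""
--     return tuple((k * xi) % m for xi in x)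
--
--
-- def generate_mod_affine_space(p0, base, m):
--     """Dynamic programming over the mixed-radix index t: writing t = c*m**j + r
--     with m**j <= t < m**(j+1) (top digit c, remainder r < t), the point at
--     position t is the point at position r translated by c*base[j]."""
--     if m < 2:
--         return [tuple(p0)]
--     base = list(base)
--     # scaled[j][c] = c * base[j]  (mod m), computed once
--     scaled = [[mod_product(ej, c, m) for c in range(m)] for ej in base]
--     res = [tuple(p0)]
--     p = 1  # p = m**j, the largest power of m with p <= t
--     j = 0
--     for t in range(1, m ** len(base)):
--         if t == p * m:
--             p *= m
--             j += 1
--         c, r = divmod(t, p)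
--         res.append(mod_addition(res[r], scaled[j][c], m))
--     return res
-- ===== Notes on version B (the rewrite author's own statement) =====
-- stated objective: alternative
-- what changed: B enumerates each point independently from its mixed-radix index t (digit (t//m**i)%m along base[i], folding only nonzero digits), instead of A's growing a list via nested k/point loops that repeatedly extend the accumulated space.
import Mathlib
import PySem

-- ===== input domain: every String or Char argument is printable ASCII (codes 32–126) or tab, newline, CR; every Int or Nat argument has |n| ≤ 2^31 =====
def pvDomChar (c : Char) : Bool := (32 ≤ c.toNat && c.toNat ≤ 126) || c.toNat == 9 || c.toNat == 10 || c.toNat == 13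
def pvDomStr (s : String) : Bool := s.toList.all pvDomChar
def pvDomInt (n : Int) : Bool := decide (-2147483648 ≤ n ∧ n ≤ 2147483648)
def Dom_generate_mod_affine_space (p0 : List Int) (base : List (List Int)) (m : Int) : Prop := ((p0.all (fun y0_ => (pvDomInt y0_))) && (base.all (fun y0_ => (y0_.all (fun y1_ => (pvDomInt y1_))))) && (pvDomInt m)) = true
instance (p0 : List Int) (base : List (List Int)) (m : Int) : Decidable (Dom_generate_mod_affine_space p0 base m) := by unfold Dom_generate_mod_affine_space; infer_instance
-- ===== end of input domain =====

-- B computes each point by dynamic programming over the mixed-radix index (point t = point (t % m^j) + top-digit * base[j]) instead of A's nested list-growing loops; alternative decomposition, same cost.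

-- ===== PORT A =====
-- mod_addition (shared helper of both Pythons)
def pvModAdd (x y : List Int) (m : Int) : List Int :=
  (x.zip y).map (fun p => PySem.Int.mod (p.1 + p.2) m)

-- mod_product (shared helper of both Pythons)
def pvModProd (x : List Int) (k m : Int) : List Int :=
  x.map (fun xi => PySem.Int.mod (k * xi) m)

def generate_mod_affine_space (p0 : List Int) (base : List (List Int)) (m : Int) : List (List Int) :=
  base.foldl (fun affine ei =>
      affine ++ (PySem.List.pyRange 1 m 1).foldl
        (fun np k => np ++ affine.map (fun p => pvModAdd p (pvModProd ei k m) m)) [])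
    [p0]

-- ===== PORT B =====
-- scaled[j][c] = c * base[j] (mod m)  (the 'scaled' table of Source B)
def pvScaled (base : List (List Int)) (m : Int) : List (List (List Int)) :=
  base.map (fun ej => (PySem.List.pyRange 0 m 1).map (fun c => pvModProd ej c m))

-- one iteration of Source B's loop body; state (res, p, j); divmod(t, p) is
-- PySem floordiv/mod (exact: p is never 0 on a reached state, p ∈ {1, m, m², …})
def pvStep (m : Int) (scaled : List (List (List Int)))
    (st : List (List Int) × Int × Int) (t : Int) : List (List Int) × Int × Int :=
  let st' := if t = st.2.1 * m then (st.1, st.2.1 * m, st.2.2 + 1) else st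
  let c := PySem.Int.floordiv t st'.2.1
  let r := PySem.Int.mod t st'.2.1
  (st'.1 ++ [pvModAdd (PySem.List.pyGetD st'.1 r [])
      (PySem.List.pyGetD (PySem.List.pyGetD scaled st'.2.2 []) c []) m],
   st'.2.1, st'.2.2)

def generate_mod_affine_space_alt (p0 : List Int) (base : List (List Int)) (m : Int) : List (List Int) :=
  if m < 2 then [p0]
  else
    ((PySem.List.pyRange 1 (m ^ base.length) 1).foldl
      (pvStep m (pvScaled base m)) ([p0], 1, 0)).1

-- ===== PRECONDITION & SPEC =====
def Spec_generate_mod_affine_space (p0 : List Int) (base : List (List Int)) (m : Int) (out : List (List Int)) : Prop := out = generate_mod_affine_space_alt p0 base m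
instance (p0 : List Int) (base : List (List Int)) (m : Int) (out : List (List Int)) : Decidable (Spec_generate_mod_affine_space p0 base m out) := by unfold Spec_generate_mod_affine_space; infer_instance

-- ===== CLAIM (what is proved, stated in full; the proofs are below) =====
def Claim_equal_generate_mod_affine_space : Prop := ∀ (p0 : List Int) (base : List (List Int)) (m : Int), Dom_generate_mod_affine_space p0 base m → Spec_generate_mod_affine_space p0 base m (generate_mod_affine_space p0 base m)

-- ===== LEMMAS AND PROOFS =====

-- the point of the affine space at mixed-radix index t (proof-side characterisation:
-- digit (t // m^i) % m along base[i], nonzero digits folded in increasing i)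
def pvPointAt (p0 : List Int) (base : List (List Int)) (m t : Int) : List Int :=
  (PySem.List.enumerate base 0).foldl (fun acc ie =>
      let c := PySem.Int.mod (PySem.Int.floordiv t (m ^ ie.1.toNat)) m
      if c ≠ 0 then pvModAdd acc (pvModProd ie.2 c m) m else acc)
    p0

-- a fold whose step fixes the accumulator on every member is the identity
theorem pvFoldl_id {A B' : Type} {l : List A} {f : B' → A → B'} {init : B'}
    (h : ∀ acc, ∀ x ∈ l, f acc x = acc) : l.foldl f init = init := by
  rw [PySem.List.foldl_congr_mem l f (fun acc _ => acc) init h]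
  clear h
  induction l with
  | nil => rfl
  | cons a l ih => exact ih

-- shift of a pyRange block
theorem pvRange_shift (a s : Int) :
    PySem.List.pyRange s (a + s) 1 = (PySem.List.pyRange 0 a 1).map (fun t => t + s) := by
  rw [PySem.List.pyRange_one, PySem.List.pyRange_one, List.map_map]
  have h1 : (a + s - s) = a - 0 := by ring
  rw [h1]
  exact List.map_congr_left (fun k _ => by simp [Function.comp]; ring)

-- flatMap congruence on members
theorem pvFlatMap_congr {A B : Type} {l : List A} {f g : A → List B}
    (h : ∀ x ∈ l, f x = g x) : l.flatMap f = l.flatMap g := by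
  induction l with
  | nil => rfl
  | cons a l ih =>
    simp only [List.flatMap_cons, h a (by simp), ih (fun x hx => h x (by simp [hx]))]

-- stability of lower digits: adding k*m^n does not change digits i < n
theorem pvPointAt_stable (p0 : List Int) (bs : List (List Int)) (m t0 k : Int)
    (hm : 2 ≤ m) :
    pvPointAt p0 bs m (t0 + k * m ^ bs.length) = pvPointAt p0 bs m t0 := by
  unfold pvPointAt
  apply PySem.List.foldl_congr_mem
  intro acc x hx
  rcases (PySem.List.mem_enumerate_iff _ _ _).1 hx with ⟨i, hi, rfl⟩
  have hidx : ((0 : Int) + (i : Int)).toNat = i := by omega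
  have hmpos : (0:Int) < m ^ i := pow_pos (by omega) i
  have hdig : PySem.Int.mod (PySem.Int.floordiv (t0 + k * m ^ bs.length) (m ^ i)) m
      = PySem.Int.mod (PySem.Int.floordiv t0 (m ^ i)) m := by
    rw [PySem.Int.floordiv_eq_ediv_of_pos hmpos, PySem.Int.floordiv_eq_ediv_of_pos hmpos,
        PySem.Int.mod_eq_emod_of_pos (by omega : (0:Int) < m),
        PySem.Int.mod_eq_emod_of_pos (by omega : (0:Int) < m)]
    have hsplit : m ^ bs.length = m ^ i * m ^ (bs.length - i) := by
      rw [← pow_add]; congr 1; omega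
    have h2 : t0 + k * m ^ bs.length = t0 + (k * m ^ (bs.length - i)) * m ^ i := by
      rw [hsplit]; ring
    rw [h2, Int.add_mul_ediv_right _ _ (ne_of_gt hmpos)]
    have hfac : m ^ (bs.length - i) = m * m ^ (bs.length - i - 1) := by
      rw [← pow_succ']; congr 1; omega
    have h3 : t0 / m ^ i + k * m ^ (bs.length - i)
        = t0 / m ^ i + m * (k * m ^ (bs.length - i - 1)) := by rw [hfac]; ring
    rw [h3, Int.add_mul_emod_self_left]
  dsimp only
  rw [hidx, hdig]

-- the affine point at index 0 is p0 itself
theorem pvPointAt_zero (p0 : List Int) (bs : List (List Int)) (m : Int) (hm : 2 ≤ m) :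
    pvPointAt p0 bs m 0 = p0 := by
  unfold pvPointAt
  apply pvFoldl_id
  intro acc x hx
  rcases (PySem.List.mem_enumerate_iff _ _ _).1 hx with ⟨i, hi, rfl⟩
  have hmpos : (0:Int) < m ^ ((0:Int) + (i:Int)).toNat := pow_pos (by omega) _
  have h0 : PySem.Int.floordiv 0 (m ^ ((0:Int) + (i:Int)).toNat) = 0 := by
    rw [PySem.Int.floordiv_eq_ediv_of_pos hmpos]; simp
  dsimp only
  rw [h0, PySem.Int.mod_eq_emod_of_pos (by omega : (0:Int) < m)]
  simp

-- the top digit of t0 + k*m^n is k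
theorem pvTopDigit (m t0 k : Int) (n : Nat) (hm : 2 ≤ m)
    (ht0 : 0 ≤ t0) (ht0' : t0 < m ^ n) (hk : 0 ≤ k) (hk' : k < m) :
    PySem.Int.mod (PySem.Int.floordiv (t0 + k * m ^ n) (m ^ n)) m = k := by
  have hMpos : (0:Int) < m ^ n := pow_pos (by omega) n
  rw [PySem.Int.floordiv_eq_ediv_of_pos hMpos,
      PySem.Int.mod_eq_emod_of_pos (by omega : (0:Int) < m)]
  rw [Int.add_mul_ediv_right _ _ (ne_of_gt hMpos),
      Int.ediv_eq_zero_of_lt ht0 ht0', zero_add]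
  exact Int.emod_eq_of_lt hk hk'

-- appending one base vector e to pvPointAt
theorem pvPointAt_append (p0 : List Int) (bs : List (List Int)) (e : List Int)
    (m t0 k : Int) (hm : 2 ≤ m) (ht0 : 0 ≤ t0) (ht0' : t0 < m ^ bs.length)
    (hk : 0 ≤ k) (hk' : k < m) :
    pvPointAt p0 (bs ++ [e]) m (t0 + k * m ^ bs.length)
      = if k ≠ 0 then pvModAdd (pvPointAt p0 bs m t0) (pvModProd e k m) m
        else pvPointAt p0 bs m t0 := by
  unfold pvPointAt
  rw [PySem.List.enumerate_append, List.foldl_append]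
  have hstab := pvPointAt_stable p0 bs m t0 k hm
  unfold pvPointAt at hstab
  rw [hstab]
  simp only [PySem.List.enumerate_cons, PySem.List.enumerate_nil, List.foldl_cons,
    List.foldl_nil]
  have hidx : ((0 : Int) + (bs.length : Int)).toNat = bs.length := by omega
  rw [hidx, pvTopDigit m t0 k bs.length hm ht0 ht0' hk hk']

-- block decomposition of the index range [0, M*K)
theorem pvBlocks (F : Int → List Int) (M : Int) (hM : 0 < M) (K : Int) (hK : 0 ≤ K) :
    (PySem.List.pyRange 0 (M * K) 1).map F
      = (PySem.List.pyRange 0 K 1).flatMap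
          (fun k => (PySem.List.pyRange 0 M 1).map (fun t0 => F (t0 + k * M))) := by
  refine Int.le_induction ?_ ?_ K hK
  · simp [PySem.List.pyRange_one_eq_nil]
  · intro K hK ih
    have hMK : (0:Int) ≤ M * K := mul_nonneg hM.le hK
    rw [show M * (K + 1) = M * K + M by ring,
        PySem.List.pyRange_one_append 0 (M * K) (M * K + M) hMK (by omega),
        List.map_append, ih,
        show M * K + M = M + M * K by ring,
        pvRange_shift M (M * K), List.map_map,
        PySem.List.pyRange_one_succ_right hK, List.flatMap_append]
    simp [Function.comp, mul_comm]

-- the degenerate case m < 2: no new points are ever added by A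
theorem pvTrivial (p0 : List Int) (m : Int) (hm : m < 2) (bs : List (List Int)) :
    generate_mod_affine_space p0 bs m = [p0] := by
  have hnil : PySem.List.pyRange 1 m 1 = [] :=
    PySem.List.pyRange_one_eq_nil (by omega)
  unfold generate_mod_affine_space
  simp only [hnil, List.foldl_nil, List.append_nil]
  induction bs with
  | nil => rfl
  | cons e bs ih => exact ih

-- A enumerates pvPointAt in index order: right-to-left induction on base (case m ≥ 2)
theorem pvMain (p0 : List Int) (m : Int) (hm : 2 ≤ m) : ∀ (bs : List (List Int)),
    generate_mod_affine_space p0 bs m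
      = (PySem.List.pyRange 0 (m ^ bs.length) 1).map (pvPointAt p0 bs m) := by
  intro bs
  induction bs using List.reverseRecOn with
  | nil =>
    have h1 : PySem.List.pyRange 0 1 1 = [0] := by
      simpa using PySem.List.pyRange_one_singleton (a := (0:Int))
    simp [generate_mod_affine_space, pvPointAt, PySem.List.enumerate_nil, h1]
  | append_singleton bs e ih =>
    have hMpos : (0:Int) < m ^ bs.length := pow_pos (by omega) bs.length
    unfold generate_mod_affine_space
    rw [List.foldl_append, List.foldl_cons, List.foldl_nil]
    unfold generate_mod_affine_space at ih
    rw [ih, PySem.List.foldl_append_eq_flatMap, List.nil_append]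
    have hlen : (bs ++ [e]).length = bs.length + 1 := by simp
    rw [hlen, pow_succ,
        pvBlocks (pvPointAt p0 (bs ++ [e]) m) (m ^ bs.length) hMpos m (by omega),
        PySem.List.pyRange_one_cons (by omega : (0:Int) < m), List.flatMap_cons]
    congr 1
    · refine List.map_congr_left ?_
      intro t0 ht0
      rw [PySem.List.mem_pyRange_one] at ht0
      rw [pvPointAt_append p0 bs e m t0 0 hm ht0.1 ht0.2 le_rfl (by omega)]
      simp
    · refine pvFlatMap_congr ?_
      intro k hk
      rw [PySem.List.mem_pyRange_one] at hk
      rw [List.map_map]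
      refine List.map_congr_left ?_
      intro t0 ht0
      rw [PySem.List.mem_pyRange_one] at ht0
      rw [pvPointAt_append p0 bs e m t0 k hm ht0.1 ht0.2 (by omega) hk.2]
      simp only [Function.comp]
      rw [if_pos (by omega : k ≠ 0)]

-- digits of index t above position k vanish when t < m^k: only base.take k matters
theorem pvPointAt_take (p0 : List Int) (B : List (List Int)) (m t : Int) (k : Nat)
    (hm : 2 ≤ m) (ht : 0 ≤ t) (ht' : t < m ^ k) :
    pvPointAt p0 B m t = pvPointAt p0 (B.take k) m t := by
  by_cases hk : B.length ≤ k
  · rw [List.take_of_length_le hk]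
  · push_neg at hk
    conv_lhs => rw [show B = B.take k ++ B.drop k from (List.take_append_drop k B).symm]
    unfold pvPointAt
    rw [PySem.List.enumerate_append, List.foldl_append]
    apply pvFoldl_id
    intro acc x hx
    rcases (PySem.List.mem_enumerate_iff _ _ _).1 hx with ⟨i, hi, rfl⟩
    have hlen : (B.take k).length = k := by simp [List.length_take]; omega
    have hidx : (((0:Int) + ((B.take k).length : Int)) + (i : Int)).toNat = k + i := by
      rw [hlen]; omega
    have hki : m ^ k ≤ m ^ (k + i) := pow_le_pow_right₀ (by omega : (1:Int) ≤ m) (by omega)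
    have hdig : PySem.Int.mod (PySem.Int.floordiv t (m ^ (k + i))) m = 0 := by
      rw [PySem.Int.floordiv_eq_ediv_of_pos (pow_pos (by omega) _),
          Int.ediv_eq_zero_of_lt ht (by omega),
          PySem.Int.mod_eq_emod_of_pos (by omega : (0:Int) < m)]
      simp
    dsimp only
    rw [hidx, hdig]
    simp

-- peeling the top nonzero digit: point (r + c*m^j) = point r + c*base[j]
theorem pvPointAt_top (p0 : List Int) (B : List (List Int)) (m r c : Int) (j : Nat)
    (hm : 2 ≤ m) (hj : j < B.length) (hr : 0 ≤ r) (hr' : r < m ^ j)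
    (hc : 1 ≤ c) (hc' : c < m) :
    pvPointAt p0 B m (r + c * m ^ j)
      = pvModAdd (pvPointAt p0 B m r) (pvModProd B[j] c m) m := by
  have hmj : (0:Int) < m ^ j := pow_pos (by omega) j
  have htlt : r + c * m ^ j < m ^ (j + 1) := by
    have h1 : c * m ^ j ≤ (m - 1) * m ^ j := by
      apply mul_le_mul_of_nonneg_right (by omega) hmj.le
    have h2 : m ^ (j + 1) = m * m ^ j := by rw [pow_succ]; ring
    nlinarith
  rw [pvPointAt_take p0 B m (r + c * m ^ j) (j + 1) hm (by nlinarith) htlt]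
  have htake : B.take (j + 1) = B.take j ++ [B[j]] := by
    rw [List.take_succ]
    congr 1
    rw [List.getElem?_eq_getElem hj]
    rfl
  have hlenj : (B.take j).length = j := by simp [List.length_take]; omega
  rw [htake]
  have happ := pvPointAt_append p0 (B.take j) B[j] m r c hm hr (by rw [hlenj]; exact hr')
    (by omega) hc'
  rw [hlenj] at happ
  rw [happ, if_pos (by omega : c ≠ 0),
      pvPointAt_take p0 B m r j hm hr hr']

-- table lookup: scaled[j][c] = c * base[j] (mod m)
theorem pvScaled_get (B : List (List Int)) (m : Int) (j c : Int) (hm : 2 ≤ m)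
    (hj : 0 ≤ j) (hj' : j < B.length) (hc : 0 ≤ c) (hc' : c < m) :
    PySem.List.pyGetD (PySem.List.pyGetD (pvScaled B m) j []) c []
      = pvModProd (B[j.toNat]'(by omega)) c m := by
  unfold pvScaled
  rw [PySem.List.pyGetD_eq_getElem _ _ hj (by simpa using hj')]
  rw [List.getElem_map]
  exact PySem.List.pyGetD_map_pyRange_of_nonneg _ m c [] hc hc'

-- the loop invariant of B's fold: after the iterations for 1..t-1 the result list
-- holds the first t points and (p, j) satisfy p = m^j, m^j ≤ t ≤ m^(j+1)
theorem pvInvariant (p0 : List Int) (B : List (List Int)) (m : Int) (hm : 2 ≤ m)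
    (t : Int) (ht : 1 ≤ t) (htN : t ≤ m ^ B.length) :
    ∃ j : Nat,
      (PySem.List.pyRange 1 t 1).foldl (pvStep m (pvScaled B m)) ([p0], 1, 0)
        = ((PySem.List.pyRange 0 t 1).map (pvPointAt p0 B m), m ^ j, (j : Int))
      ∧ m ^ j ≤ t ∧ t ≤ m ^ (j + 1) := by
  revert htN
  induction t, ht using Int.le_induction with
  | base =>
    intro htN
    refine ⟨0, ?_, by norm_num, by norm_num; omega⟩
    rw [PySem.List.pyRange_one_eq_nil le_rfl]
    have h1 : PySem.List.pyRange 0 1 1 = [0] := by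
      simpa using PySem.List.pyRange_one_singleton (a := (0:Int))
    simp [h1, pvPointAt_zero p0 B m hm]
  | succ t ht ih =>
    intro htN
    obtain ⟨j, hst, hjt, htj⟩ := ih (by omega)
    have hNpos : (0:Int) < m ^ B.length := pow_pos (by omega) B.length
    have htN' : t < m ^ B.length := by omega
    have hmj : (0:Int) < m ^ j := pow_pos (by omega) j
    rw [PySem.List.pyRange_one_succ_right (by omega : (1:Int) ≤ t), List.foldl_append,
        hst, List.foldl_cons, List.foldl_nil]
    have hres : ∀ (r : Int), 0 ≤ r → r < t →
        PySem.List.pyGetD ((PySem.List.pyRange 0 t 1).map (pvPointAt p0 B m)) r []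
          = pvPointAt p0 B m r := fun r h1 h2 =>
      PySem.List.pyGetD_map_pyRange_of_nonneg _ t r [] h1 h2
    have hmapsucc : (PySem.List.pyRange 0 (t+1) 1).map (pvPointAt p0 B m)
        = (PySem.List.pyRange 0 t 1).map (pvPointAt p0 B m) ++ [pvPointAt p0 B m t] := by
      rw [PySem.List.pyRange_one_succ_right (by omega : (0:Int) ≤ t), List.map_append]
      rfl
    by_cases hbump : t = m ^ j * m
    · -- t reaches the next power of m: p and j advance, top digit is 1, remainder 0
      have hj1 : (j + 1 : Nat) < B.length := by
        by_contra hcon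
        push_neg at hcon
        have : m ^ B.length ≤ m ^ (j + 1) :=
          pow_le_pow_right₀ (by omega : (1:Int) ≤ m) hcon
        rw [pow_succ] at this
        omega
      have hpow : m ^ j * m = m ^ (j + 1) := (pow_succ m j).symm
      refine ⟨j + 1, ?_, ?_, ?_⟩
      · unfold pvStep
        rw [if_pos hbump]
        dsimp only
        have hc : PySem.Int.floordiv t (m ^ j * m) = 1 := by
          rw [hbump, PySem.Int.floordiv_eq_ediv_of_pos (by positivity)]
          exact Int.ediv_self (by positivity)
        have hr : PySem.Int.mod t (m ^ j * m) = 0 := by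
          rw [hbump, PySem.Int.mod_eq_emod_of_pos (by positivity)]
          simp
        rw [hc, hr, hres 0 le_rfl (by omega),
            pvScaled_get B m ((j:Int) + 1) 1 hm (by omega) (by push_cast; omega)
              (by omega) (by omega)]
        have hcast : (((j:Int) + 1).toNat) = j + 1 := by omega
        have hpoint : pvPointAt p0 B m t
            = pvModAdd (pvPointAt p0 B m 0) (pvModProd (B[j+1]'hj1) 1 m) m := by
          have := pvPointAt_top p0 B m 0 1 (j+1) hm hj1 le_rfl
            (pow_pos (by omega) _) le_rfl (by omega)
          rw [zero_add, one_mul] at this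
          rw [hbump, hpow, this]
        simp only [hcast, hmapsucc, hpoint, hpow]
        push_cast
        constructor <;> rfl
      · rw [← hpow]; omega
      · have h2 : m ^ (j + 1 + 1) = m ^ (j + 1) * m := pow_succ m (j + 1)
        have h3 : m ^ (j + 1) * m ≥ m ^ (j + 1) * 2 :=
          mul_le_mul_of_nonneg_left (by omega) (by positivity)
        omega
    · -- within the current block: top digit c = t // m^j ∈ [1, m), remainder r < m^j
      have htlt : t < m ^ (j + 1) := by
        rw [pow_succ] at htj ⊢
        omega
      have hjB : j < B.length := by
        by_contra hcon
        push_neg at hcon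
        have : m ^ B.length ≤ m ^ j := pow_le_pow_right₀ (by omega : (1:Int) ≤ m) hcon
        omega
      set c := PySem.Int.floordiv t (m ^ j) with hcdef
      set r := PySem.Int.mod t (m ^ j) with hrdef
      have hceq : c = t / m ^ j := by rw [hcdef, PySem.Int.floordiv_eq_ediv_of_pos hmj]
      have hreq : r = t % m ^ j := by rw [hrdef, PySem.Int.mod_eq_emod_of_pos hmj]
      have hc1 : 1 ≤ c := by rw [hceq]; exact Int.le_ediv_iff_mul_le hmj |>.2 (by omega)
      have hcm : c < m := by
        rw [hceq]
        apply Int.ediv_lt_of_lt_mul hmj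
        have h2 : m ^ (j + 1) = m * m ^ j := by rw [pow_succ]; ring
        omega
      have hr0 : 0 ≤ r := by rw [hreq]; exact Int.emod_nonneg t (ne_of_gt hmj)
      have hrm : r < m ^ j := by rw [hreq]; exact Int.emod_lt_of_pos t hmj
      have hdecomp : t = r + c * m ^ j := by
        rw [hceq, hreq]
        have h1 := Int.ediv_add_emod t (m ^ j)
        have h2 : m ^ j * (t / m ^ j) = t / m ^ j * m ^ j := mul_comm _ _
        omega
      refine ⟨j, ?_, by omega, by omega⟩
      unfold pvStep
      rw [if_neg hbump]
      dsimp only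
      rw [← hcdef, ← hrdef, hres r hr0 (by omega),
          pvScaled_get B m (j:Int) c hm (by omega) (by simpa using hjB) (by omega) hcm]
      have hcast : ((j:Int)).toNat = j := by omega
      have hpoint : pvPointAt p0 B m t
          = pvModAdd (pvPointAt p0 B m r) (pvModProd (B[j]'hjB) c m) m := by
        conv_lhs => rw [hdecomp]
        exact pvPointAt_top p0 B m r c j hm hjB hr0 hrm hc1 hcm
      simp only [hcast, hmapsucc, hpoint]

-- ===== VERDICT (by name: the statement is the Claim_ definition above) =====
theorem generate_mod_affine_space_spec : Claim_equal_generate_mod_affine_space := by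
  intro p0 base m _hd
  unfold Spec_generate_mod_affine_space generate_mod_affine_space_alt
  by_cases hm : m < 2
  · rw [if_pos hm]
    exact pvTrivial p0 m hm base
  · rw [if_neg hm]
    have hm2 : 2 ≤ m := by omega
    have hN : (1:Int) ≤ m ^ base.length := by
      have := pow_pos (show (0:Int) < m by omega) base.length
      omega
    obtain ⟨j, hst, -, -⟩ := pvInvariant p0 base m hm2 (m ^ base.length) hN le_rfl
    rw [hst]
    exact pvMain p0 m hm2 base
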